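-- pv_equiv track=rewrite | github.com/GaMaDeCa/RandomCode | Python/OnionV3.py | based
-- ===== SOURCE A (Python) =====
-- def based(index, length, charSet):
--     base = len(charSet)
--     digits = [0] * length
--     pos = length - 1
--     while pos >= 0:
--         digits[pos] = index % base
--         index = index // base
--         pos -= 1
--     word = [""] * length
--     i = 0
--     while i < length:
--         word[i] = charSet[digits[i]]
--         i += 1
--     return "".join(word), digits
-- ===== SOURCE B (Python) =====
-- def based(index, length, charSet):
--     base = len(charSet)
--     n = max(length, 0)
--     rev = []  # least-significant digits first, significant part only
--     while index not in (0, -1) and len(rev) < n: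
--         index, d = divmod(index, base)
--         rev.append(d)
--     fill = 0 if index == 0 else base - 1
--     digits = [fill] * (n - len(rev)) + rev[::-1]
--     return ''.join(charSet[d] for d in digits), digits
-- ===== Notes on version B (the rewrite author's own statement) =====
-- stated objective: faster
-- what changed: A runs the full length-step divmod chain and then a second indexing loop; B stops the divmod chain as soon as the quotient stabilizes at 0 or -1 (after O(log |index|) steps), fills the remaining high digits in closed form (0 or base-1), and builds word and digits from that in one pass.
import Mathlib
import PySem

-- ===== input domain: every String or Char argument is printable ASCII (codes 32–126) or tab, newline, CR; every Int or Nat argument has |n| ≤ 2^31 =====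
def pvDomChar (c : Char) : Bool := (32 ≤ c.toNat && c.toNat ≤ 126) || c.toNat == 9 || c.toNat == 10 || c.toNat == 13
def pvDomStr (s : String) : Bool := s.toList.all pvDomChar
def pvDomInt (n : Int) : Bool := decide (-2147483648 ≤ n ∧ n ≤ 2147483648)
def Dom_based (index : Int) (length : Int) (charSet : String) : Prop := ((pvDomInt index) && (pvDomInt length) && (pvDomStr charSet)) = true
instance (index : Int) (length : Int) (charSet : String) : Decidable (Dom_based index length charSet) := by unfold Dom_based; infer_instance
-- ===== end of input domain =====

-- B stops the divmod chain as soon as the quotient stabilizes at 0 or -1 and pads the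
-- remaining high digits in closed form, instead of A's fixed full-length back-filling loops.

-- ===== PORT A =====
-- the while loop 'pos = length-1 downto 0: digits[pos] = index % base; index //= base'
-- filling the list from the back; fuel = number of remaining positions
def basedDigitsA (index : Int) (base : Int) : Nat → List Int
  | 0 => []
  | n + 1 => basedDigitsA (PySem.Int.floordiv index base) base n ++ [PySem.Int.mod index base]

def based (index : Int) (length : Int) (charSet : String) : String × List Int :=
  let base : Int := PySem.Str.len charSet
  let digits := basedDigitsA index base length.toNat
  -- second loop: word[i] = charSet[digits[i]]; in-range under Pre_, ' ' default unreachable there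
  let word := digits.map (fun d => (PySem.List.pyGet? charSet.toList d).getD ' ')
  (String.ofList word, digits)

-- ===== PORT B =====
-- Source B's while loop: state (index, rev); fuel = n - len(rev) (the loop appends one digit
-- per iteration and stops when len(rev) reaches n, or earlier when index is 0 or -1)
def basedAltLoop (base : Int) : Nat → Int → List Int → Int × List Int
  | 0, index, rev => (index, rev)
  | fuel + 1, index, rev =>
    if index = 0 ∨ index = -1 then (index, rev)
    else basedAltLoop base fuel (PySem.Int.floordiv index base) (rev ++ [PySem.Int.mod index base])

def based_alt (index : Int) (length : Int) (charSet : String) : String × List Int :=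
  let base : Int := PySem.Str.len charSet
  let n : Nat := (max length 0).toNat
  let r := basedAltLoop base n index []
  let fill : Int := if r.1 = 0 then 0 else base - 1
  let digits := List.replicate (n - r.2.length) fill ++ r.2.reverse
  (String.ofList (digits.map (fun d => (PySem.List.pyGet? charSet.toList d).getD ' ')), digits)

-- ===== PRECONDITION & SPEC =====
-- Both programs raise when charSet is empty and length ≥ 1 (A: ZeroDivisionError on '% base';
-- B: ZeroDivisionError or IndexError); exactly those inputs are excluded.
def Pre_based (index : Int) (length : Int) (charSet : String) : Prop :=
  length ≤ 0 ∨ charSet.toList ≠ []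
instance (index : Int) (length : Int) (charSet : String) : Decidable (Pre_based index length charSet) := by unfold Pre_based; infer_instance
def pvWitness_based : Int × Int × String := (5, 3, "ab")

def Spec_based (index : Int) (length : Int) (charSet : String) (out : String × List Int) : Prop := out = based_alt index length charSet
instance (index : Int) (length : Int) (charSet : String) (out : String × List Int) : Decidable (Spec_based index length charSet out) := by unfold Spec_based; infer_instance

-- ===== CLAIM (what is proved, stated in full; the proofs are below) =====
def Claim_equal_based : Prop := ∀ (index : Int) (length : Int) (charSet : String), Dom_based index length charSet → Pre_based index length charSet → Spec_based index length charSet (based index length charSet)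

-- ===== LEMMAS AND PROOFS =====

theorem pv_digitsA_zero (base : Int) : ∀ n : Nat, basedDigitsA 0 base n = List.replicate n 0 := by
  intro n
  induction n with
  | zero => rfl
  | succ n ih =>
    rw [basedDigitsA]
    have h1 : PySem.Int.floordiv 0 base = 0 := by simp [PySem.Int.floordiv]
    have h2 : PySem.Int.mod 0 base = 0 := by simp [PySem.Int.mod]
    rw [h1, h2, ih, List.replicate_succ']

theorem pv_digitsA_neg_one (base : Int) (hb : 0 < base) :
    ∀ n : Nat, basedDigitsA (-1) base n = List.replicate n (base - 1) := by
  intro n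
  induction n with
  | zero => rfl
  | succ n ih =>
    rw [basedDigitsA]
    have hdm : (-1 : Int) / base = -1 ∧ (-1 : Int) % base = base - 1 :=
      (Int.ediv_emod_unique hb).mpr ⟨by ring_nf, by omega, by omega⟩
    have h1 : PySem.Int.floordiv (-1) base = -1 := by
      rw [PySem.Int.floordiv_eq_ediv_of_pos hb]; exact hdm.1
    have h2 : PySem.Int.mod (-1) base = base - 1 := by
      rw [PySem.Int.mod_eq_emod_of_pos hb]; exact hdm.2
    rw [h1, h2, ih, List.replicate_succ']

-- accumulator lemma: the loop only appends to rev
theorem pv_loop_acc (base : Int) : ∀ (fuel : Nat) (index : Int) (rev : List Int),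
    basedAltLoop base fuel index rev =
      ((basedAltLoop base fuel index []).1, rev ++ (basedAltLoop base fuel index []).2) := by
  intro fuel
  induction fuel with
  | zero => intro index rev; simp [basedAltLoop]
  | succ fuel ih =>
    intro index rev
    rw [basedAltLoop, basedAltLoop]
    by_cases h : index = 0 ∨ index = -1
    · simp [h]
    · simp only [if_neg h]
      rw [ih _ (rev ++ _), ih _ ([] ++ _)]
      simp

-- A's fixed-length digit list equals B's early-exit digits plus closed-form padding
theorem pv_digits_eq (base : Int) (hb : 0 < base) :
    ∀ (n : Nat) (index : Int),
      basedDigitsA index base n =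
        List.replicate (n - (basedAltLoop base n index []).2.length)
            (if (basedAltLoop base n index []).1 = 0 then 0 else base - 1) ++
          (basedAltLoop base n index []).2.reverse := by
  intro n
  induction n with
  | zero => intro index; rfl
  | succ n ih =>
    intro index
    by_cases h : index = 0 ∨ index = -1
    · rw [show basedAltLoop base (n+1) index [] = (index, []) from by rw [basedAltLoop, if_pos h]]
      rcases h with h | h <;> subst h
      · simp [pv_digitsA_zero]
      · simp [pv_digitsA_neg_one base hb]
    · rw [show basedAltLoop base (n+1) index [] =
            basedAltLoop base n (PySem.Int.floordiv index base) [PySem.Int.mod index base] from by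
          rw [basedAltLoop, if_neg h]; simp]
      rw [pv_loop_acc base n (PySem.Int.floordiv index base) [PySem.Int.mod index base]]
      rw [basedDigitsA, ih (PySem.Int.floordiv index base)]
      simp only [List.length_cons, List.reverse_cons, List.reverse_append, List.length_append,
        List.length_nil, List.reverse_nil, List.nil_append]
      have hsub : ∀ L : Nat, n + 1 - (1 + L) = n - L := by intro L; omega
      rw [hsub]
      simp [List.append_assoc]

-- ===== VERDICT (by name: the statement is the Claim_ definition above) =====
theorem based_spec : Claim_equal_based := by
  intro index length charSet _ hpre
  unfold Spec_based based based_alt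
  by_cases hl : length ≤ 0
  · have h1 : length.toNat = 0 := by omega
    have h2 : (max length 0).toNat = 0 := by omega
    rw [h1, h2]
    rfl
  · have hb : 0 < PySem.Str.len charSet := by
      rcases hpre with h | h
      · omega
      · simp [PySem.Str.len_eq]
        exact List.length_pos_of_ne_nil h
    have hn : (max length 0).toNat = length.toNat := by omega
    rw [hn]
    have hd := pv_digits_eq (PySem.Str.len charSet) hb length.toNat index
    simp only [hd]
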